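-- pv_equiv track=rewrite | github.com/anirudhvsp/TreeParser | fileReader.py | count_and_strip_spaces
-- ===== SOURCE A (Python) =====
-- def count_and_strip_spaces(input_string):
--     num_spaces = 0
--     for char in input_string:
--         if char == ' ':
--             num_spaces += 1
--         else:
--             break
--     return num_spaces, input_string.strip().split('|')[0]
-- ===== SOURCE B (Python) =====
-- def count_and_strip_spaces(input_string):
--     # Single index-based scan: count leading spaces, continue past remaining
--     # whitespace, then cut the first '|' field by index arithmetic (find +
--     # slice) instead of strip().split('|')[0].
--     WS = ' \t\n\r\v\f'
--     n = len(input_string)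
--     ns = 0
--     while ns < n and input_string[ns] == ' ':
--         ns += 1
--     i = ns
--     while i < n and input_string[i] in WS:
--         i += 1
--     j = input_string.find('|', i)
--     if j == -1:
--         j = n
--         while j > i and input_string[j - 1] in WS:
--             j -= 1
--     return ns, input_string[i:j]
-- ===== Notes on version B (the rewrite author's own statement) =====
-- stated objective: alternative
-- what changed: Instead of a count-with-break loop plus the strip().split('|')[0] pipeline, B does one index-based scan: count leading spaces, continue skipping whitespace, locate the first '|' with find and slice the segment out directly (with a backward index loop for trailing whitespace when no '|' exists); no strip, no split, no intermediate list.
import Mathlib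
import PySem

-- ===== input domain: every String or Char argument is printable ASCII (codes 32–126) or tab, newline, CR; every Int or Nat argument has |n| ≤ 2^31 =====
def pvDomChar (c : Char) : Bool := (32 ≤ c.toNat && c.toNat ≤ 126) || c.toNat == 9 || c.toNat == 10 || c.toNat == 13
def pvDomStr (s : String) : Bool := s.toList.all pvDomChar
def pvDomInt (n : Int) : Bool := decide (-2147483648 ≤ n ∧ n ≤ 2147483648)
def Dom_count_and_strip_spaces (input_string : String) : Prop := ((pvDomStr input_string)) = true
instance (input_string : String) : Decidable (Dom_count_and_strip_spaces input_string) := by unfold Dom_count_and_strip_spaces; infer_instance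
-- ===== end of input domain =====

-- B replaces the count-with-break loop plus strip().split('|')[0] pipeline by one
-- index-based scan (count spaces, skip whitespace, find '|', slice); alternative
-- decomposition, same cost.


-- ===== PORT A =====
-- the 'for char in input_string: if char == ' ': num_spaces += 1 else: break' loop
def pvCountLoop : List Char → Int
  | [] => 0
  | c :: rest => if c = ' ' then 1 + pvCountLoop rest else 0

def count_and_strip_spaces (input_string : String) : Int × String :=
  (pvCountLoop input_string.toList,
   -- input_string.strip().split('|')[0]; split('|') is always non-empty, so [0] never raises
   (((PySem.Str.split? (PySem.Str.strip input_string) "|").getD []).headD ""))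

-- ===== PORT B =====
-- the membership test 'c in WS' for WS = ' \t\n\r\v\f'
def pvWSb (c : Char) : Bool :=
  c == ' ' || c == '\t' || c == '\n' || c == '\r' || c == Char.ofNat 11 || c == Char.ofNat 12

-- the 'while ns < n and input_string[ns] == " "' loop; returns (ns, the suffix from index ns)
def pvBCount : List Char → Int × List Char
  | [] => (0, [])
  | c :: r => if c = ' ' then ((pvBCount r).1 + 1, (pvBCount r).2) else (0, c :: r)

def count_and_strip_spaces_alt (input_string : String) : Int × String :=
  let p := pvBCount input_string.toList
  -- 'while i < n and input_string[i] in WS: i += 1' — skip remaining whitespace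
  let rest := p.2.dropWhile pvWSb
  -- j = input_string.find('|', i): searching from index i is searching in the suffix 'rest',
  -- and j == -1 ↔ '|' not in rest.  If found, input_string[i:j] is the part of rest before
  -- the first '|' (exact: find returns the FIRST occurrence); if j == -1 the backward
  -- 'while j > i and input_string[j-1] in WS: j -= 1' loop drops the trailing WS of rest.
  let seg := if rest.contains '|' then rest.takeWhile (fun c => c != '|')
             else (rest.reverse.dropWhile pvWSb).reverse
  (p.1, String.ofList seg)

-- ===== PRECONDITION & SPEC =====
def Spec_count_and_strip_spaces (input_string : String) (out : Int × String) : Prop := out = count_and_strip_spaces_alt input_string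
instance (input_string : String) (out : Int × String) : Decidable (Spec_count_and_strip_spaces input_string out) := by unfold Spec_count_and_strip_spaces; infer_instance

-- ===== CLAIM (what is proved, stated in full; the proofs are below) =====
def Claim_equal_count_and_strip_spaces : Prop := ∀ (input_string : String), Dom_count_and_strip_spaces input_string → Spec_count_and_strip_spaces input_string (count_and_strip_spaces input_string)

-- ===== LEMMAS AND PROOFS =====

theorem pvBCount_fst (cs : List Char) : (pvBCount cs).1 = pvCountLoop cs := by
  induction cs with
  | nil => rfl
  | cons c r ih =>
    by_cases h : c = ' ' <;> simp [pvBCount, pvCountLoop, h, ih] <;> ring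

theorem pvBCount_snd (cs : List Char) : (pvBCount cs).2 = cs.dropWhile (fun c => c == ' ') := by
  induction cs with
  | nil => rfl
  | cons c r ih =>
    by_cases h : c = ' '
    · simp [pvBCount, List.dropWhile_cons, h, ih]
    · have hb : (c == ' ') = false := by simp [h]
      simp [pvBCount, List.dropWhile_cons, h, hb]

-- dropping with a weaker predicate first does not change a dropWhile
theorem dropWhile_dropWhile_of_imp {α : Type} (p q : α → Bool)
    (h : ∀ a, p a = true → q a = true) (l : List α) :
    (l.dropWhile p).dropWhile q = l.dropWhile q := by
  induction l with
  | nil => rfl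
  | cons a t ih =>
    by_cases hp : p a = true
    · simp [List.dropWhile_cons, hp, h a hp, ih]
    · simp [List.dropWhile_cons, hp]

theorem dropWhile_congr_mem {α : Type} (p q : α → Bool) (l : List α)
    (h : ∀ a ∈ l, p a = q a) : l.dropWhile p = l.dropWhile q := by
  induction l with
  | nil => rfl
  | cons a t ih =>
    have ha := h a (by simp)
    by_cases hp : p a = true
    · simp [List.dropWhile_cons, hp, ha ▸ hp, ih fun a hm => h a (by simp [hm])]
    · simp only [List.dropWhile_cons, hp, ← ha, if_neg]
      simp [hp]

theorem char_toNat_inj (c d : Char) (h : c.toNat = d.toNat) : c = d := by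
  have := congrArg Char.ofNat h
  simpa [Char.ofNat_toNat] using this

-- on the domain's characters, 'c in WS' agrees with Python str.isspace (hence with strip)
theorem pvWSb_eq_isspace (c : Char) (h : pvDomChar c = true) :
    pvWSb c = PySem.Chars.isspace c := by
  have hn : ∀ d : Char, (c == d) = (c.toNat == d.toNat) := by
    intro d
    by_cases hd : c = d
    · simp [hd]
    · have : ¬ c.toNat = d.toNat := fun hh => hd (char_toNat_inj _ _ hh)
      simp [hd, this]
  simp only [pvDomChar, Bool.or_eq_true, Bool.and_eq_true, decide_eq_true_eq, beq_iff_eq] at h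
  simp only [pvWSb, PySem.Chars.isspace, hn]
  have h9 : ('\t').toNat = 9 := by decide
  have h10 : ('\n').toNat = 10 := by decide
  have h13 : ('\r').toNat = 13 := by decide
  have h32 : (' ').toNat = 32 := by decide
  have h11 : (Char.ofNat 11).toNat = 11 := by decide
  have h12 : (Char.ofNat 12).toNat = 12 := by decide
  rw [h9, h10, h13, h32, h11, h12, Bool.eq_iff_iff]
  simp only [Bool.or_eq_true, Bool.and_eq_true, beq_iff_eq, decide_eq_true_eq]
  omega

-- the accumulator of splitOn.go only prepends finished pieces
theorem splitOn_go_acc (sep : List Char) (fuel : Nat) :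
    ∀ (l cur : List Char) (acc : List (List Char)),
    PySem.Chars.splitOn.go sep fuel l cur acc
      = acc.reverse ++ PySem.Chars.splitOn.go sep fuel l cur [] := by
  induction fuel with
  | zero => intro l cur acc; simp [PySem.Chars.splitOn.go]
  | succ fuel ih =>
    intro l cur acc
    cases l with
    | nil => simp [PySem.Chars.splitOn.go]
    | cons c rest =>
      simp only [PySem.Chars.splitOn.go]
      split_ifs with hp
      · rw [ih _ [] (cur.reverse :: acc), ih _ [] [cur.reverse]]
        simp
      · exact ih rest (c :: cur) acc

-- the first piece of a split on a one-character separator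
theorem splitOn_go_head (d : Char) (fuel : Nat) :
    ∀ (l cur : List Char), l.length ≤ fuel →
    (PySem.Chars.splitOn.go [d] fuel l cur []).headD []
      = cur.reverse ++ (if l.contains d then l.takeWhile (fun c => c != d) else l) := by
  induction fuel with
  | zero =>
    intro l cur h
    have hl : l = [] := List.eq_nil_of_length_eq_zero (Nat.le_zero.mp h)
    subst hl
    simp [PySem.Chars.splitOn.go]
  | succ fuel ih =>
    intro l cur h
    cases l with
    | nil => simp [PySem.Chars.splitOn.go]
    | cons c rest =>
      simp only [PySem.Chars.splitOn.go]
      by_cases hc : d = c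
      · have hp : [d].isPrefixOf (c :: rest) = true := by
          simp [List.isPrefixOf, hc]
        rw [if_pos hp, splitOn_go_acc]
        subst hc
        simp
      · have hp : [d].isPrefixOf (c :: rest) = false := by
          simp [List.isPrefixOf, hc]
        have hcd : (c == d) = false := by simp; exact fun hh => hc hh.symm
        rw [if_neg (by simp [hp]), ih rest (c :: cur) (by simpa using Nat.le_of_succ_le_succ h)]
        by_cases hrm : d ∈ rest
        · have hne : ¬ c = d := fun hh => hc hh.symm
          simp [List.contains_eq_mem, hrm, hne, hc, List.takeWhile_cons, hcd]
        · simp [List.contains_eq_mem, hrm, hc, hcd]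

theorem splitOn_head (d : Char) (l : List Char) :
    (PySem.Chars.splitOn l [d]).headD []
      = (if l.contains d then l.takeWhile (fun c => c != d) else l) := by
  have := splitOn_go_head d (l.length + 1) l [] (by omega)
  simpa [PySem.Chars.splitOn] using this

theorem headD_map_ofList (l : List (List Char)) :
    ((l.map String.ofList).headD "") = String.ofList (l.headD []) := by
  cases l <;> rfl

-- trailing part removed by rstrip: decomposition and its properties
theorem rstrip_decomp (l : List Char) :
    l = PySem.Chars.rstrip l ++ (l.reverse.takeWhile PySem.Chars.isspace).reverse := by
  unfold PySem.Chars.rstrip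
  rw [← List.reverse_append, List.takeWhile_append_dropWhile, List.reverse_reverse]

theorem pipe_not_mem_trailing (l : List Char) :
    '|' ∉ (l.reverse.takeWhile PySem.Chars.isspace).reverse := by
  intro hmem
  have := List.mem_takeWhile_imp (List.mem_reverse.mp hmem)
  simp [PySem.Chars.isspace] at this

-- takeWhile (≠ d) over the rstrip decomposition, when d occurs in the kept part
theorem takeWhile_ne_append_of_mem (d : Char) (t w : List Char) (h : d ∈ t) :
    (t ++ w).takeWhile (fun c => c != d) = t.takeWhile (fun c => c != d) := by
  rw [List.takeWhile_append]
  split_ifs with hlen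
  · exfalso
    have heq : t.takeWhile (fun c => c != d) = t :=
      (List.takeWhile_prefix _).eq_of_length hlen
    have hd : d ∈ t.takeWhile (fun c => c != d) := by rw [heq]; exact h
    have := List.mem_takeWhile_imp hd
    simp at this
  · rfl

-- ===== VERDICT (by name: the statement is the Claim_ definition above) =====
theorem count_and_strip_spaces_spec : Claim_equal_count_and_strip_spaces := by
  intro s hdom
  unfold Spec_count_and_strip_spaces count_and_strip_spaces count_and_strip_spaces_alt
  have hmem : ∀ c ∈ s.toList, pvDomChar c = true := by
    simpa [Dom_count_and_strip_spaces, pvDomStr, List.all_eq_true] using hdom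
  rw [Prod.mk.injEq]
  refine ⟨(pvBCount_fst s.toList).symm, ?_⟩
  -- the leading-whitespace-stripped suffix computed by B equals lstrip
  have hrest : ((pvBCount s.toList).2.dropWhile pvWSb) = PySem.Chars.lstrip s.toList := by
    rw [pvBCount_snd]
    have hsub : ∀ c ∈ s.toList.dropWhile (fun c => c == ' '), pvDomChar c = true :=
      fun c hc => hmem c ((List.dropWhile_sublist _).subset hc)
    rw [dropWhile_congr_mem pvWSb PySem.Chars.isspace _
      (fun c hc => pvWSb_eq_isspace c (hsub c hc))]
    unfold PySem.Chars.lstrip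
    exact dropWhile_dropWhile_of_imp _ _
      (fun a ha => by
        have : a = ' ' := by simpa using ha
        subst this; decide) s.toList
  -- A's strip/split/[0] in list form
  have hsplit : PySem.Str.split? (PySem.Str.strip s) "|"
      = some ((PySem.Chars.splitOn (PySem.Chars.strip s.toList) ['|']).map String.ofList) := by
    simp [PySem.Str.split?, PySem.Chars.split?, PySem.Str.toList_strip]
  rw [hsplit]
  simp only [Option.getD_some, headD_map_ofList, splitOn_head]
  rw [hrest]
  -- decompose lstrip into rstrip part and trailing whitespace
  set r0 := PySem.Chars.lstrip s.toList with hr0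
  set t := PySem.Chars.rstrip r0 with ht
  set w := (r0.reverse.takeWhile PySem.Chars.isspace).reverse with hw
  have hdecomp : r0 = t ++ w := rstrip_decomp r0
  have hstrip : PySem.Chars.strip s.toList = t := rfl
  have hcont : r0.contains '|' = t.contains '|' := by
    rw [hdecomp, List.contains_append]
    have hwf : w.contains '|' = false := by
      simp only [List.contains_eq_mem, decide_eq_false_iff_not]
      exact pipe_not_mem_trailing r0
    rw [hwf, Bool.or_false]
  have hsubr : ∀ c ∈ r0, pvDomChar c = true := by
    intro c hc
    exact hmem c ((List.dropWhile_sublist _).subset (hr0 ▸ hc))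
  rw [hstrip, hcont]
  by_cases hc : t.contains '|' = true
  · rw [if_pos hc, if_pos hc]
    have hmemt : '|' ∈ t := by simpa [List.contains_eq_mem] using hc
    rw [hdecomp, takeWhile_ne_append_of_mem '|' t w hmemt]
  · rw [if_neg hc, if_neg hc]
    -- B's backward whitespace loop is rstrip
    have : r0.reverse.dropWhile pvWSb = r0.reverse.dropWhile PySem.Chars.isspace := by
      refine dropWhile_congr_mem _ _ _ (fun c hcm => pvWSb_eq_isspace c ?_)
      exact hsubr c (List.mem_reverse.mp hcm)
    rw [this]
    rfl
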